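-- pv_equiv track=rewrite | github.com/DimitriosKoliat/DataVisualization | src/datApp/datApp.py | titleFixer
-- ===== SOURCE A (Python) =====
-- def titleFixer(m):
--     title = ''
--     i=0
--     if(len(m) == 1):
--         title += m[0].replace("_"," ")
--     else:
--         for x in m:
--             title += x.replace("_"," ")
--             if(i+2 == len(m)):
--                 title += " and "
--             elif(i+1 == len(m)):
--                 title += ""
--             else:
--                 title += ", "
--             i+=1
--     return title
-- ===== SOURCE B (Python) =====
-- def titleFixer(m):
--     parts = [x.replace("_", " ") for x in m]
--     if len(parts) <= 1:
--         return "".join(parts)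
--     return ", ".join(parts[:-1]) + " and " + parts[-1]
-- ===== Notes on version B (the rewrite author's own statement) =====
-- stated objective: simpler
-- what changed: Replaces the index-tracking accumulating loop with positional separator branches by a map to cleaned parts, a ', '.join over all but the last part, and explicit ' and ' + last-part concatenation; join also avoids repeated string concatenation.
import Mathlib
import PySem

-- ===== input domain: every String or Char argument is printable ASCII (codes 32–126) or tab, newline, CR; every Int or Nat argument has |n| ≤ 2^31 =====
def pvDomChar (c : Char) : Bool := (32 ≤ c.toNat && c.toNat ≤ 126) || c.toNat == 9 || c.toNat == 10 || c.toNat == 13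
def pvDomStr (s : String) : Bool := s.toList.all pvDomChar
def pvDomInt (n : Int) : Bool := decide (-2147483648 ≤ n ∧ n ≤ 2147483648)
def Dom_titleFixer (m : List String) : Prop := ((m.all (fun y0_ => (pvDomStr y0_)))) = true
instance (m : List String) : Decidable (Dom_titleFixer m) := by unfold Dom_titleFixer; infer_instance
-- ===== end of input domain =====

-- B replaces A's index-tracking loop by map + join-over-all-but-last + explicit last element ('simpler').

-- ===== PORT A =====
-- the 'for x in m' loop with the running index i and the string accumulator title
def titleFixerLoop (n : Nat) : List String → Nat → String → String
  | [], _, title => title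
  | x :: xs, i, title =>
      let t := title ++ PySem.Str.replace x "_" " "
      let t' := if i + 2 = n then t ++ " and "
                else if i + 1 = n then t ++ ""
                else t ++ ", "
      titleFixerLoop n xs (i + 1) t'

def titleFixer (m : List String) : String :=
  if h : m.length = 1 then "" ++ PySem.Str.replace (m[0]'(by omega)) "_" " "
  else titleFixerLoop m.length m 0 ""

-- ===== PORT B =====
def titleFixer_alt (m : List String) : String :=
  let parts := m.map (fun x => PySem.Str.replace x "_" " ")
  if parts.length ≤ 1 then PySem.Str.join "" parts
  else PySem.Str.join ", " (PySem.List.slice parts none (some (-1))) ++ " and "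
         ++ ((PySem.List.pyGet? parts (-1)).getD "")

-- ===== PRECONDITION & SPEC =====
def Spec_titleFixer (m : List String) (out : String) : Prop := out = titleFixer_alt m
instance (m : List String) (out : String) : Decidable (Spec_titleFixer m out) := by unfold Spec_titleFixer; infer_instance

-- ===== CLAIM (what is proved, stated in full; the proofs are below) =====
def Claim_equal_titleFixer : Prop := ∀ (m : List String), Dom_titleFixer m → Spec_titleFixer m (titleFixer m)

-- ===== LEMMAS AND PROOFS =====

-- the value both programs compute on a cleaned parts list
def pvGlue : List String → String
  | [] => ""
  | [x] => x
  | x :: y :: r => x ++ (if r = [] then " and " else ", ") ++ pvGlue (y :: r)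

theorem pv_join_nil (sep : String) : PySem.Str.join sep [] = "" := by
  apply String.toList_injective; simp [PySem.Chars.join, List.intercalate]

theorem pv_join_singleton (sep x : String) : PySem.Str.join sep [x] = x := by
  apply String.toList_injective; simp [PySem.Chars.join, List.intercalate]

theorem pv_join_cons_cons (sep x y : String) (r : List String) :
    PySem.Str.join sep (x :: y :: r) = x ++ sep ++ PySem.Str.join sep (y :: r) := by
  apply String.toList_injective
  simp [PySem.Chars.join_cons_cons]

theorem pv_loop_eq (n : Nat) (xs : List String) :
    ∀ (i : Nat) (acc : String), i + xs.length = n →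
      titleFixerLoop n xs i acc = acc ++ pvGlue (xs.map (fun x => PySem.Str.replace x "_" " ")) := by
  induction xs with
  | nil => intro i acc _; simp [titleFixerLoop, pvGlue]
  | cons x xs ih =>
    intro i acc h
    rw [titleFixerLoop]
    rw [ih (i + 1) _ (by simp at h ⊢; omega)]
    cases xs with
    | nil =>
      have h1 : i + 1 = n := by simpa using h
      simp [pvGlue, show ¬ (i + 2 = n) by omega, h1]
    | cons y ys =>
      cases ys with
      | nil =>
        have h2 : i + 2 = n := by simpa using h
        simp [pvGlue, h2, String.append_assoc]
      | cons z zs =>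
        have hne2 : ¬ (i + 2 = n) := by simp at h; omega
        have hne1 : ¬ (i + 1 = n) := by simp at h; omega
        simp [pvGlue, hne2, hne1, String.append_assoc]

theorem pv_b_eq (x y : String) (ys : List String) :
    PySem.Str.join ", " (PySem.List.slice (x :: y :: ys) none (some (-1))) ++ " and "
      ++ ((PySem.List.pyGet? (x :: y :: ys) (-1)).getD "")
    = pvGlue (x :: y :: ys) := by
  have hslice : ∀ (s : String) (xs : List String),
      PySem.List.slice (s :: xs) none (some (-1)) = (s :: xs).dropLast := by
    intro s xs; simp [PySem.List.slice, List.dropLast_eq_take]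
  have hlast : ∀ (s : String) (xs : List String),
      (PySem.List.pyGet? (s :: xs) (-1)).getD "" = (s :: xs).getLast (by simp) := by
    intro s xs
    simp only [PySem.List.pyGet?, PySem.List.pyIdx?, List.getLast_eq_getElem]
    norm_num
    rfl
  rw [hslice, hlast]
  induction ys generalizing x y with
  | nil => simp [pvGlue, pv_join_singleton, String.append_assoc]
  | cons z zs ih =>
    have hd : (x :: y :: z :: zs).dropLast = x :: (y :: z :: zs).dropLast := by simp
    rw [hd]
    have hcons : (y :: z :: zs).dropLast = y :: (z :: zs).dropLast := by simp
    rw [hcons, pv_join_cons_cons, ← hcons]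
    have hl : (x :: y :: z :: zs).getLast (by simp) = (y :: z :: zs).getLast (by simp) := by
      simp [List.getLast_cons]
    rw [hl]
    have hg : pvGlue (x :: y :: z :: zs) = x ++ ", " ++ pvGlue (y :: z :: zs) := by
      rw [pvGlue]; simp
    rw [hg, ← ih y z]
    simp [String.append_assoc]

-- ===== VERDICT (by name: the statement is the Claim_ definition above) =====
theorem titleFixer_spec : Claim_equal_titleFixer := by
  intro m _
  unfold Spec_titleFixer titleFixer titleFixer_alt
  match m with
  | [] => simp [titleFixerLoop, pv_join_nil]
  | [x] => simp [pv_join_singleton]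
  | x :: y :: ys =>
    have hlen : ¬ ((x :: y :: ys).length = 1) := by simp
    rw [dif_neg hlen]
    rw [pv_loop_eq _ _ 0 "" (by simp)]
    have hlen2 : ¬ ((x :: y :: ys).map (fun x => PySem.Str.replace x "_" " ")).length ≤ 1 := by simp
    simp only [List.map_cons]
    rw [pv_b_eq]
    apply String.toList_injective; simp
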